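-- pv_equiv track=rewrite | github.com/amayer21/obds-training | GC_count_fasta.py | basecount
-- ===== SOURCE A (Python) =====
-- def basecount(line, GCcount, ATcount, other):
--     for base in line.rstrip().upper():
--         if base == 'C' or base == 'G':
--             GCcount = GCcount + 1
--         elif base == 'A' or base == 'T':
--             ATcount = ATcount+1
--         else:
--             other = other+1
--     return GCcount, ATcount, other
-- ===== SOURCE B (Python) =====
-- def basecount(line, GCcount, ATcount, other):
--     s = line.rstrip().upper()
--     gcn = s.count('C') + s.count('G')
--     atn = s.count('A') + s.count('T')
--     return GCcount + gcn, ATcount + atn, other + (len(s) - gcn - atn)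
-- ===== Notes on version B (the rewrite author's own statement) =====
-- stated objective: idiomatic
-- what changed: Replaces the per-character branching loop with targeted str.count scans for C/G/A/T and derives the 'other' tally in closed form as len(s) - gc - at.
import Mathlib
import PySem

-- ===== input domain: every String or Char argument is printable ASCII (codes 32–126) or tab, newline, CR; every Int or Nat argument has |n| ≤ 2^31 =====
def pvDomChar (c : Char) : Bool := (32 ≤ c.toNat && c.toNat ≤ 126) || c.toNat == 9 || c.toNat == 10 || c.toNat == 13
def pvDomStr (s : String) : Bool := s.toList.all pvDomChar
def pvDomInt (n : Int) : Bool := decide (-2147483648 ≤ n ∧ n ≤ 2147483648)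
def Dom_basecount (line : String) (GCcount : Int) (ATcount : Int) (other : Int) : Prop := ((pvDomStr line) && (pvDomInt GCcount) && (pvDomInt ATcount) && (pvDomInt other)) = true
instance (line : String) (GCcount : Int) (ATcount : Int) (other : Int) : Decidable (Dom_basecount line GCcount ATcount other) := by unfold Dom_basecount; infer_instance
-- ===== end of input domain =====

-- B replaces A's per-character branch loop with targeted counts and a closed-form 'other' (idiomatic).

-- ===== PORT A =====
-- loop body: classify one char, updating one of the three counters
def basecountStep (st : Int × Int × Int) (base : Char) : Int × Int × Int :=
  if base == 'C' || base == 'G' then (st.1 + 1, st.2.1, st.2.2)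
  else if base == 'A' || base == 'T' then (st.1, st.2.1 + 1, st.2.2)
  else (st.1, st.2.1, st.2.2 + 1)

-- for base in line.rstrip().upper(): classify each char, updating one of three counters
def basecount (line : String) (GCcount : Int) (ATcount : Int) (other : Int) : Int × Int × Int :=
  (PySem.Str.upper (PySem.Str.rstrip line)).toList.foldl basecountStep (GCcount, ATcount, other)

-- ===== PORT B =====
-- s.count('C') on a single character is the count of that character; ported as List.count on the code points (exact)
def basecount_alt (line : String) (GCcount : Int) (ATcount : Int) (other : Int) : Int × Int × Int :=
  let s := (PySem.Str.upper (PySem.Str.rstrip line)).toList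
  let gc : Int := (s.count 'C' : Int) + (s.count 'G' : Int)
  let atc : Int := (s.count 'A' : Int) + (s.count 'T' : Int)
  (GCcount + gc, ATcount + atc, other + ((s.length : Int) - gc - atc))

-- ===== PRECONDITION & SPEC =====
def Spec_basecount (line : String) (GCcount : Int) (ATcount : Int) (other : Int) (out : Int × Int × Int) : Prop := out = basecount_alt line GCcount ATcount other
instance (line : String) (GCcount : Int) (ATcount : Int) (other : Int) (out : Int × Int × Int) : Decidable (Spec_basecount line GCcount ATcount other out) := by unfold Spec_basecount; infer_instance

-- ===== CLAIM (what is proved, stated in full; the proofs are below) =====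
def Claim_equal_basecount : Prop := ∀ (line : String) (GCcount : Int) (ATcount : Int) (other : Int), Dom_basecount line GCcount ATcount other → Spec_basecount line GCcount ATcount other (basecount line GCcount ATcount other)

-- ===== LEMMAS AND PROOFS =====
theorem basecount_foldl_eq (l : List Char) (g a o : Int) :
    l.foldl basecountStep (g, a, o)
    = (g + (l.count 'C' : Int) + (l.count 'G' : Int),
       a + (l.count 'A' : Int) + (l.count 'T' : Int),
       o + ((l.length : Int) - (l.count 'C' : Int) - (l.count 'G' : Int)
              - (l.count 'A' : Int) - (l.count 'T' : Int))) := by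
  induction l generalizing g a o with
  | nil => simp
  | cons c t ih =>
    rw [List.foldl_cons]
    by_cases hC : c = 'C'
    · rw [show basecountStep (g, a, o) c = (g + 1, a, o) by simp [basecountStep, hC], ih]
      simp [List.count_cons, hC, Prod.ext_iff]; omega
    · by_cases hG : c = 'G'
      · rw [show basecountStep (g, a, o) c = (g + 1, a, o) by simp [basecountStep, hG], ih]
        simp [List.count_cons, hC, hG, Prod.ext_iff]; omega
      · by_cases hA : c = 'A'
        · rw [show basecountStep (g, a, o) c = (g, a + 1, o) by
            simp [basecountStep, hA, hC, hG], ih]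
          simp [List.count_cons, hC, hG, hA, Prod.ext_iff]; omega
        · by_cases hT : c = 'T'
          · rw [show basecountStep (g, a, o) c = (g, a + 1, o) by
              simp [basecountStep, hT, hC, hG, hA], ih]
            simp [List.count_cons, hC, hG, hA, hT, Prod.ext_iff]; omega
          · rw [show basecountStep (g, a, o) c = (g, a, o + 1) by
              simp [basecountStep, hC, hG, hA, hT], ih]
            simp [List.count_cons, hC, hG, hA, hT, Prod.ext_iff]; omega

-- ===== VERDICT (by name: the statement is the Claim_ definition above) =====
theorem basecount_spec : Claim_equal_basecount := by
  intro line GCcount ATcount other _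
  unfold Spec_basecount basecount basecount_alt
  rw [basecount_foldl_eq]
  refine Prod.ext ?_ (Prod.ext ?_ ?_) <;> simp <;> ring
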